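-- pv_equiv track=rewrite | github.com/Boubix88/DIY-StreamDeck | Python/View/DisplayView.py | split_svg_paths
-- ===== SOURCE A (Python) =====
-- def split_svg_paths(svg_path):
--     paths = []
--     current_path = ''
--     i = 0
--     while i < len(svg_path):
--         if svg_path[i] == 'M' and current_path:
--             paths.append(current_path.strip())
--             current_path = 'M'
--         else:
--             current_path += svg_path[i]
--         i += 1
--     if current_path:
--         paths.append(current_path.strip())
--     return paths
-- ===== SOURCE B (Python) =====
-- import re
--
-- def split_svg_paths(svg_path):
--     if not svg_path:
--         return []
--     return [p.strip() for p in re.split(r'(?<=.)(?=M)', svg_path, flags=re.S)]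
-- ===== Notes on version B (the rewrite author's own statement) =====
-- stated objective: faster
-- what changed: Replaced the accumulating character-by-character while-loop with a single regex split at every delimiter command not at position 0, then strips the pieces in a comprehension; this removes the quadratic repeated string concatenation.
import Mathlib
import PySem

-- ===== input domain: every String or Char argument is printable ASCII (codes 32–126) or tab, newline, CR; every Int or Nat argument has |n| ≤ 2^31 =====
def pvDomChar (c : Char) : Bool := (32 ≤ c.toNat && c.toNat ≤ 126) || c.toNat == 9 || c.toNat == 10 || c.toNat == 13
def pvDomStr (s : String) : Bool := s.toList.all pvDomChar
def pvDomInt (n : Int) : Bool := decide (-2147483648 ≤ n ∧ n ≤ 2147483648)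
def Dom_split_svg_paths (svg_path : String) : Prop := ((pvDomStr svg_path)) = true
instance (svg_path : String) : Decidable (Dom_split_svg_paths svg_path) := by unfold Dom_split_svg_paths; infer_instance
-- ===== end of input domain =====

-- B replaces A's character-by-character accumulating while-loop with one regex split at
-- every 'M' not at position 0, then strips each piece (objective: idiomatic/simpler).

-- ===== PORT A =====
-- A's while-loop over the characters, carrying (paths, current_path).
def pvLoopA : List Char → List String → List Char → List String
  | [], paths, cur => if cur ≠ [] then paths ++ [String.ofList (PySem.Chars.strip cur)] else paths
  | c :: rest, paths, cur =>
      if c = 'M' ∧ cur ≠ [] then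
        pvLoopA rest (paths ++ [String.ofList (PySem.Chars.strip cur)]) ['M']
      else
        pvLoopA rest paths (cur ++ [c])

def split_svg_paths (svg_path : String) : List String :=
  pvLoopA svg_path.toList [] []

-- ===== PORT B =====
-- re.split(r'(?<=.)(?=M)', s, flags=re.S): pieces run from each start to the next 'M'
-- strictly after it (the lookbehind forbids a split at index 0).
def pvRegexSplitM : List Char → List (List Char)
  | [] => []
  | c :: rest =>
      (c :: rest.takeWhile (· ≠ 'M')) :: pvRegexSplitM (rest.dropWhile (· ≠ 'M'))
termination_by l => l.length
decreasing_by
  have := List.length_dropWhile_le (p := fun x => decide (x ≠ 'M')) (l := rest)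
  simp only [List.length_cons]; omega

def split_svg_paths_alt (svg_path : String) : List String :=
  if svg_path = "" then []
  else (pvRegexSplitM svg_path.toList).map (fun p => String.ofList (PySem.Chars.strip p))

-- ===== PRECONDITION & SPEC =====
def Spec_split_svg_paths (svg_path : String) (out : List String) : Prop := out = split_svg_paths_alt svg_path
instance (svg_path : String) (out : List String) : Decidable (Spec_split_svg_paths svg_path out) := by unfold Spec_split_svg_paths; infer_instance

-- ===== CLAIM (what is proved, stated in full; the proofs are below) =====
def Claim_equal_split_svg_paths : Prop := ∀ (svg_path : String), Dom_split_svg_paths svg_path → Spec_split_svg_paths svg_path (split_svg_paths svg_path)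

-- ===== LEMMAS AND PROOFS =====

-- A's loop with a nonempty accumulator produces exactly the stripped regex pieces.
theorem pvLoopA_eq (l : List Char) : ∀ (paths : List String) (cur : List Char), cur ≠ [] →
    pvLoopA l paths cur =
      paths ++ (((cur ++ l.takeWhile (· ≠ 'M')) :: pvRegexSplitM (l.dropWhile (· ≠ 'M'))).map
        (fun p => String.ofList (PySem.Chars.strip p))) := by
  induction l with
  | nil =>
      intro paths cur hcur
      simp [pvLoopA, pvRegexSplitM, hcur]
  | cons c rest ih =>
      intro paths cur hcur
      by_cases hc : c = 'M'
      · subst hc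
        rw [pvLoopA, if_pos ⟨rfl, hcur⟩, ih _ ['M'] (by simp)]
        simp [pvRegexSplitM]
      · rw [pvLoopA, if_neg (by simp [hc]), ih _ (cur ++ [c]) (by simp)]
        simp [hc]

-- ===== VERDICT (by name: the statement is the Claim_ definition above) =====
theorem split_svg_paths_spec : Claim_equal_split_svg_paths := by
  intro s _
  unfold Spec_split_svg_paths split_svg_paths split_svg_paths_alt
  by_cases hs : s = ""
  · subst hs; simp [pvLoopA]
  · rw [if_neg hs]
    have hne : s.toList ≠ [] := fun h => hs (by
      have := congrArg String.ofList h; simpa using this)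
    obtain ⟨c, rest, hcr⟩ := List.exists_cons_of_ne_nil hne
    rw [hcr, pvLoopA, if_neg (by simp)]
    rw [show ([] : List Char) ++ [c] = [c] from rfl, pvLoopA_eq rest [] [c] (by simp)]
    simp [pvRegexSplitM]
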